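-- pv_equiv track=rewrite | github.com/Rishabh-j6/reportraahat | backend/app/routers/exercise.py | resolve_tier
-- ===== SOURCE A (Python) =====
-- def resolve_tier(exercise_flags: list[str], severity: str) -> str:
--     """Pick the most restrictive tier from the flags list."""
--     priority = ["LIGHT_WALKING_ONLY", "CARDIO_RESTRICTED", "NORMAL_ACTIVITY", "ACTIVE_ENCOURAGED"]
--     if severity == "URGENT":
--         return "LIGHT_WALKING_ONLY"
--     for tier in priority:
--         if tier in exercise_flags:
--             return tier
--     return "NORMAL_ACTIVITY"
-- ===== SOURCE B (Python) =====
-- def resolve_tier(exercise_flags: list[str], severity: str) -> str: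
--     """Pick the most restrictive tier from the flags list."""
--     priority = ["LIGHT_WALKING_ONLY", "CARDIO_RESTRICTED", "NORMAL_ACTIVITY", "ACTIVE_ENCOURAGED"]
--     if severity == "URGENT":
--         return "LIGHT_WALKING_ONLY"
--     rank = {"LIGHT_WALKING_ONLY": 0, "CARDIO_RESTRICTED": 1, "NORMAL_ACTIVITY": 2, "ACTIVE_ENCOURAGED": 3}
--     best = None
--     for f in exercise_flags:
--         r = rank.get(f)
--         if r is not None and (best is None or r < best):
--             best = r
--     return priority[best] if best is not None else "NORMAL_ACTIVITY"
-- ===== Notes on version B (the rewrite author's own statement) =====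
-- stated objective: idiomatic
-- what changed: B iterates over the flags once, looking each flag up in a rank table and keeping the minimum rank, instead of scanning the flags list once per priority tier; it returns the tier of the minimum rank or NORMAL_ACTIVITY if no flag is recognized.
import Mathlib
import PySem

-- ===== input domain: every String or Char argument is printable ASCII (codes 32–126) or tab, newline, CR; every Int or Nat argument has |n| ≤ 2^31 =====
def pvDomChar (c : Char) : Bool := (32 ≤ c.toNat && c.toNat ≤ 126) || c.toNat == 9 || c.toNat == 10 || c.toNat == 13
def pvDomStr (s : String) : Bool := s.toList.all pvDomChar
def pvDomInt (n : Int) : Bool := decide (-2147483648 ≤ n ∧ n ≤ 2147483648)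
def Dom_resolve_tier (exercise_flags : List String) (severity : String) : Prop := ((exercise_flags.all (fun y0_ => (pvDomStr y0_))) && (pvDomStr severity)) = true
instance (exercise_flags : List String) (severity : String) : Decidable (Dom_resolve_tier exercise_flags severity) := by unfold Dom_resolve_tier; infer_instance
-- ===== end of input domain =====

-- B replaces A's per-tier membership scans by one pass over the flags with a rank table and a running minimum (idiomatic; same result).

-- ===== PORT A =====
-- 'for tier in priority: if tier in exercise_flags: return tier' / 'return "NORMAL_ACTIVITY"'
def pvLoopA : List String → List String → String
  | [], _ => "NORMAL_ACTIVITY"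
  | t :: ts, flags => if flags.contains t then t else pvLoopA ts flags

def resolve_tier (exercise_flags : List String) (severity : String) : String :=
  let priority := ["LIGHT_WALKING_ONLY", "CARDIO_RESTRICTED", "NORMAL_ACTIVITY", "ACTIVE_ENCOURAGED"]
  if severity == "URGENT" then "LIGHT_WALKING_ONLY"
  else pvLoopA priority exercise_flags

-- ===== PORT B =====
-- rank = {"LIGHT_WALKING_ONLY": 0, ...}
def pvRank : PySem.Dict String Int :=
  PySem.Dict.ofList [("LIGHT_WALKING_ONLY", 0), ("CARDIO_RESTRICTED", 1), ("NORMAL_ACTIVITY", 2), ("ACTIVE_ENCOURAGED", 3)]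

-- loop body: r = rank.get(f); if r is not None and (best is None or r < best): best = r
def pvStep (best : Option Int) (f : String) : Option Int :=
  match pvRank.get? f with
  | some r =>
    match best with
    | none => some r
    | some b => if r < b then some r else best
  | none => best

def resolve_tier_alt (exercise_flags : List String) (severity : String) : String :=
  let priority := ["LIGHT_WALKING_ONLY", "CARDIO_RESTRICTED", "NORMAL_ACTIVITY", "ACTIVE_ENCOURAGED"]
  if severity == "URGENT" then "LIGHT_WALKING_ONLY"
  else
    match exercise_flags.foldl pvStep none with
    | some b => (PySem.List.pyGet? priority b).getD ""  -- b is a rank 0..3, always in range; the default is unreachable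
    | none => "NORMAL_ACTIVITY"

-- ===== PRECONDITION & SPEC =====
def Spec_resolve_tier (exercise_flags : List String) (severity : String) (out : String) : Prop := out = resolve_tier_alt exercise_flags severity
instance (exercise_flags : List String) (severity : String) (out : String) : Decidable (Spec_resolve_tier exercise_flags severity out) := by unfold Spec_resolve_tier; infer_instance

-- ===== CLAIM (what is proved, stated in full; the proofs are below) =====
def Claim_equal_resolve_tier : Prop := ∀ (exercise_flags : List String) (severity : String), Dom_resolve_tier exercise_flags severity → Spec_resolve_tier exercise_flags severity (resolve_tier exercise_flags severity)

-- ===== LEMMAS AND PROOFS =====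

-- option-lifted min that mirrors pvStep's update rule
def pvOMin (a b : Option Int) : Option Int :=
  match a, b with
  | none, y => y
  | some x, none => some x
  | some x, some y => if y < x then some y else some x

theorem pvStep_eq (best : Option Int) (f : String) : pvStep best f = pvOMin best (pvRank.get? f) := by
  unfold pvStep pvOMin
  cases pvRank.get? f <;> cases best <;> rfl

theorem pvOMin_assoc (a b c : Option Int) : pvOMin (pvOMin a b) c = pvOMin a (pvOMin b c) := by
  cases a <;> cases b <;> cases c <;> simp only [pvOMin] <;>
    split_ifs <;> simp_all <;> (try omega) <;> split_ifs <;> simp_all <;> omega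

theorem pvFold_out : ∀ (flags : List String) (best : Option Int),
    flags.foldl pvStep best = pvOMin best (flags.foldl pvStep none) := by
  intro flags
  induction flags with
  | nil => intro best; cases best <;> rfl
  | cons f fs ih =>
    intro best
    simp only [List.foldl_cons, pvStep_eq]
    rw [ih (pvOMin best (pvRank.get? f)), ih (pvOMin none (pvRank.get? f))]
    rw [pvOMin_assoc]
    rfl

theorem pvRank_get (f : String) :
    pvRank.get? f =
      if f = "LIGHT_WALKING_ONLY" then some 0
      else if f = "CARDIO_RESTRICTED" then some 1
      else if f = "NORMAL_ACTIVITY" then some 2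
      else if f = "ACTIVE_ENCOURAGED" then some 3
      else none := by
  have h : pvRank = ((((PySem.Dict.empty.insert "LIGHT_WALKING_ONLY" (0 : Int)).insert "CARDIO_RESTRICTED" 1).insert "NORMAL_ACTIVITY" 2).insert "ACTIVE_ENCOURAGED" 3) := by decide
  rw [h]
  simp only [PySem.Dict.get?_insert, PySem.Dict.get?_empty]
  split_ifs <;> simp_all

-- the minimum rank among the flags present is the first tier (in priority order) present
theorem pvFold_char : ∀ (flags : List String),
    flags.foldl pvStep none =
      if flags.contains "LIGHT_WALKING_ONLY" then some 0
      else if flags.contains "CARDIO_RESTRICTED" then some 1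
      else if flags.contains "NORMAL_ACTIVITY" then some 2
      else if flags.contains "ACTIVE_ENCOURAGED" then some 3
      else none := by
  intro flags
  induction flags with
  | nil => rfl
  | cons f fs ih =>
    simp only [List.foldl_cons, pvStep_eq]
    rw [pvFold_out fs, ih]
    show pvOMin (pvOMin none (pvRank.get? f)) _ = _
    rw [pvRank_get f]
    simp only [List.contains_cons]
    by_cases h0 : f = "LIGHT_WALKING_ONLY" <;>
      by_cases h1 : f = "CARDIO_RESTRICTED" <;>
        by_cases h2 : f = "NORMAL_ACTIVITY" <;>
          by_cases h3 : f = "ACTIVE_ENCOURAGED" <;>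
            simp_all [pvOMin] <;>
            split_ifs <;> simp_all

-- ===== VERDICT (by name: the statement is the Claim_ definition above) =====
theorem resolve_tier_spec : Claim_equal_resolve_tier := by
  intro flags sev _
  show resolve_tier flags sev = resolve_tier_alt flags sev
  unfold resolve_tier resolve_tier_alt
  by_cases hs : sev == "URGENT"
  · simp [hs]
  · simp only [hs, if_false, Bool.false_eq_true]
    rw [pvFold_char flags]
    by_cases c0 : flags.contains "LIGHT_WALKING_ONLY" <;>
      by_cases c1 : flags.contains "CARDIO_RESTRICTED" <;>
        by_cases c2 : flags.contains "NORMAL_ACTIVITY" <;>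
          by_cases c3 : flags.contains "ACTIVE_ENCOURAGED" <;>
            simp_all [pvLoopA, PySem.List.pyGet?, PySem.List.pyIdx?]
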